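-- pv_equiv track=rewrite | github.com/yihongL1U/ColexificationNet | association_finder.py | construct_new_concept
-- ===== SOURCE A (Python) =====
-- def construct_new_concept(identified_ngrams: set, tgt_verse_ngrams: dict):
--     """
--     :param identified_ngrams: a list of identified target strings
--     :param tgt_verse_ngrams: a dict of verse IDs and the ngrams it contains
--     :return: a set of verses that contains the identified_ngrams
--     """
--     concept_verse_set = set()
--     add = concept_verse_set.add
--     for verseID, verses_ngram in tgt_verse_ngrams.items():
--         for ngram in identified_ngrams:
--             if ngram in verses_ngram:
--                 add(verseID)
--                 break
--     return concept_verse_set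
-- ===== SOURCE B (Python) =====
-- def construct_new_concept(identified_ngrams: set, tgt_verse_ngrams: dict):
--     # Inverted index: ngram -> set of verse IDs containing it (one pass over the corpus).
--     index = {}
--     for verseID, verses_ngram in tgt_verse_ngrams.items():
--         for ngram in verses_ngram:
--             index.setdefault(ngram, set()).add(verseID)
--     # Union the postings of the identified ngrams; missing ngrams contribute nothing.
--     hits = set()
--     for ngram in identified_ngrams:
--         hits |= index.get(ngram, set())
--     # Emit the hit verses in corpus order.
--     return {verseID for verseID in tgt_verse_ngrams if verseID in hits}
-- ===== Notes on version B (the rewrite author's own statement) =====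
-- stated objective: faster
-- what changed: B builds an inverted index ngram->verse-set in one pass over the corpus, unions the postings of the identified ngrams, and emits the hit verses in corpus order, so A's per-verse rescan of identified_ngrams with break disappears.
import Mathlib
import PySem

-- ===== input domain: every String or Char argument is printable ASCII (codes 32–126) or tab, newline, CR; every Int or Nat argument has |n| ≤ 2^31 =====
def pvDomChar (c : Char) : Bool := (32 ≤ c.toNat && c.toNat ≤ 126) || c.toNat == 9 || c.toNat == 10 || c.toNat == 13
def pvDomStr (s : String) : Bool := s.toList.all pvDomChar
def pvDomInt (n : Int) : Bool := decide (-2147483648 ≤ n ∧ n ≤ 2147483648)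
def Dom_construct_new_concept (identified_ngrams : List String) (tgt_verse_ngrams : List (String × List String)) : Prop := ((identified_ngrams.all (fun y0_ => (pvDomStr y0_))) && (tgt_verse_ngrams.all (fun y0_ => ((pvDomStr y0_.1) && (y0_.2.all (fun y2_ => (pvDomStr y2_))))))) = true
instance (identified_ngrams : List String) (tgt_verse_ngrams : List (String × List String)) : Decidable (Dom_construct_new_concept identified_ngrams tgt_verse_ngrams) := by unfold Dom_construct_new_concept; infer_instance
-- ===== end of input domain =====

-- B replaces A's per-verse rescan of identified_ngrams (with break) by an inverted index
-- ngram -> verse-set built in one pass, a union of the identified ngrams' postings, and a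
-- final pass emitting the hit verses in corpus order; objective: faster (measured).

-- ===== PORT A =====
-- inner 'for ngram in identified_ngrams: if ngram in verses_ngram: … break' (true = break hit)
def pvScanIdentified (identified_ngrams : List String) (verses_ngram : List String) : Bool :=
  match identified_ngrams with
  | [] => false
  | g :: rest => if verses_ngram.contains g then true else pvScanIdentified rest verses_ngram

def construct_new_concept (identified_ngrams : List String) (tgt_verse_ngrams : List (String × List String)) : List String :=
  tgt_verse_ngrams.foldl
    (fun concept_verse_set p =>
      if pvScanIdentified identified_ngrams p.2 then PySem.Set.add concept_verse_set p.1
      else concept_verse_set)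
    PySem.Set.empty

-- ===== PORT B =====
-- 'for verseID, verses_ngram in …: for ngram in verses_ngram: index.setdefault(ngram, set()).add(verseID)'
def pvBuildIndex (tgt_verse_ngrams : List (String × List String)) : PySem.Dict String (PySem.Set String) :=
  tgt_verse_ngrams.foldl
    (fun index p =>
      p.2.foldl (fun index ngram =>
        index.modify ngram PySem.Set.empty (fun s => PySem.Set.add s p.1)) index)
    PySem.Dict.empty

def construct_new_concept_alt (identified_ngrams : List String) (tgt_verse_ngrams : List (String × List String)) : List String :=
  let index := pvBuildIndex tgt_verse_ngrams
  let hits : PySem.Set String :=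
    identified_ngrams.foldl (fun hits ngram => PySem.Set.union hits (index.getD ngram PySem.Set.empty)) PySem.Set.empty
  PySem.Set.ofList ((tgt_verse_ngrams.map Prod.fst).filter (fun verseID => hits.contains verseID))

-- ===== PRECONDITION & SPEC =====
-- Pre_ excludes association lists with duplicate verse IDs: a Python dict cannot contain
-- them (dict construction collapses duplicates), so such lists are not faithful encodings
-- of A's dict argument and which occurrence survives is an artefact of the encoding.
def Pre_construct_new_concept (identified_ngrams : List String) (tgt_verse_ngrams : List (String × List String)) : Prop :=
  (tgt_verse_ngrams.map Prod.fst).Nodup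
instance (identified_ngrams : List String) (tgt_verse_ngrams : List (String × List String)) : Decidable (Pre_construct_new_concept identified_ngrams tgt_verse_ngrams) := by unfold Pre_construct_new_concept; infer_instance
def pvWitness_construct_new_concept : List String × (List (String × List String)) :=
  (["a"], [("v1", ["a", "b"]), ("v2", ["c"])])

def Spec_construct_new_concept (identified_ngrams : List String) (tgt_verse_ngrams : List (String × List String)) (out : List String) : Prop := out = construct_new_concept_alt identified_ngrams tgt_verse_ngrams
instance (identified_ngrams : List String) (tgt_verse_ngrams : List (String × List String)) (out : List String) : Decidable (Spec_construct_new_concept identified_ngrams tgt_verse_ngrams out) := by unfold Spec_construct_new_concept; infer_instance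

-- ===== CLAIM (what is proved, stated in full; the proofs are below) =====
def Claim_equal_construct_new_concept : Prop := ∀ (identified_ngrams : List String) (tgt_verse_ngrams : List (String × List String)), Dom_construct_new_concept identified_ngrams tgt_verse_ngrams → Pre_construct_new_concept identified_ngrams tgt_verse_ngrams → Spec_construct_new_concept identified_ngrams tgt_verse_ngrams (construct_new_concept identified_ngrams tgt_verse_ngrams)

-- ===== LEMMAS AND PROOFS =====

-- A's inner scan-with-break is 'some identified ngram occurs in the verse'.
theorem pvScan_eq_any (ids ngs : List String) :
    pvScanIdentified ids ngs = ids.any (fun g => ngs.contains g) := by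
  induction ids with
  | nil => rfl
  | cons g rest ih => cases h : ngs.contains g <;> simp [pvScanIdentified, ih]

-- Inner index-building loop: who is in the posting list of g afterwards.
theorem pvIndexInner_mem (ngs : List String) (d : PySem.Dict String (PySem.Set String))
    (v g x : String) :
    (x ∈ (ngs.foldl (fun d ngram => d.modify ngram PySem.Set.empty (fun s => PySem.Set.add s v)) d).getD g PySem.Set.empty)
      ↔ x ∈ d.getD g PySem.Set.empty ∨ (g ∈ ngs ∧ x = v) := by
  induction ngs generalizing d with
  | nil => simp
  | cons hd tl ih =>
      simp only [List.foldl, ih, PySem.Dict.getD_modify]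
      by_cases h : g = hd
      · subst h; simp [PySem.Set.mem_add]; tauto
      · simp [h]

-- Whole index: x is in the posting list of g iff some corpus entry keyed x contains g.
theorem pvBuildIndex_mem (tgt : List (String × List String)) (g x : String) :
    (x ∈ (pvBuildIndex tgt).getD g PySem.Set.empty)
      ↔ ∃ p ∈ tgt, p.1 = x ∧ g ∈ p.2 := by
  unfold pvBuildIndex
  suffices h : ∀ d : PySem.Dict String (PySem.Set String),
      (x ∈ (tgt.foldl (fun index p => p.2.foldl (fun index ngram => index.modify ngram PySem.Set.empty (fun s => PySem.Set.add s p.1)) index) d).getD g PySem.Set.empty)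
        ↔ x ∈ d.getD g PySem.Set.empty ∨ ∃ p ∈ tgt, p.1 = x ∧ g ∈ p.2 by
    simpa using h PySem.Dict.empty
  induction tgt with
  | nil => simp
  | cons hd tl ih =>
      intro d
      simp only [List.foldl, ih, pvIndexInner_mem, List.mem_cons]
      constructor
      · rintro (((hx | ⟨hg, rfl⟩) | ⟨p, hp, h1, h2⟩))
        · exact Or.inl hx
        · exact Or.inr ⟨hd, Or.inl rfl, rfl, hg⟩
        · exact Or.inr ⟨p, Or.inr hp, h1, h2⟩
      · rintro (hx | ⟨p, (rfl | hp), h1, h2⟩)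
        · exact Or.inl (Or.inl hx)
        · exact Or.inl (Or.inr ⟨h2, h1.symm⟩)
        · exact Or.inr ⟨p, hp, h1, h2⟩

-- The union loop over the identified ngrams: membership in hits.
theorem pvHits_mem (ids : List String) (index : PySem.Dict String (PySem.Set String)) (x : String) :
    (x ∈ ids.foldl (fun hits ngram => PySem.Set.union hits (index.getD ngram PySem.Set.empty)) PySem.Set.empty)
      ↔ ∃ g ∈ ids, x ∈ index.getD g PySem.Set.empty := by
  suffices h : ∀ acc : PySem.Set String,
      (x ∈ ids.foldl (fun hits ngram => PySem.Set.union hits (index.getD ngram PySem.Set.empty)) acc)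
        ↔ x ∈ acc ∨ ∃ g ∈ ids, x ∈ index.getD g PySem.Set.empty by
    simpa using h PySem.Set.empty
  induction ids with
  | nil => simp
  | cons hd tl ih =>
      intro acc
      simp only [List.foldl, ih, PySem.Set.mem_union, List.mem_cons]
      constructor
      · rintro ((hx | hx) | ⟨g, hg, hx⟩)
        · exact Or.inl hx
        · exact Or.inr ⟨hd, Or.inl rfl, hx⟩
        · exact Or.inr ⟨g, Or.inr hg, hx⟩
      · rintro (hx | ⟨g, (rfl | hg), hx⟩)
        · exact Or.inl (Or.inl hx)
        · exact Or.inl (Or.inr hx)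
        · exact Or.inr ⟨g, hg, hx⟩

-- A's conditional fold over the verses is the set of first components of the filtered verses.
theorem pvFold_eq_ofList (pred : String × List String → Bool)
    (tgt : List (String × List String)) (s : PySem.Set String) :
    tgt.foldl (fun acc p => if pred p then PySem.Set.add acc p.1 else acc) s
      = List.foldl PySem.Set.add s ((tgt.filter pred).map Prod.fst) := by
  induction tgt generalizing s with
  | nil => rfl
  | cons hd tl ih =>
      simp only [List.foldl, List.filter]
      by_cases h : pred hd
      · simp [h, ih]
      · simp [h, ih]

-- ===== VERDICT (by name: the statement is the Claim_ definition above) =====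
theorem construct_new_concept_spec : Claim_equal_construct_new_concept := by
  intro ids tgt _ hnd
  unfold Spec_construct_new_concept construct_new_concept construct_new_concept_alt
  show tgt.foldl (fun acc p => if pvScanIdentified ids p.2 then PySem.Set.add acc p.1 else acc) PySem.Set.empty
      = PySem.Set.ofList ((tgt.map Prod.fst).filter (fun verseID =>
          PySem.Set.contains (ids.foldl (fun hits ngram => PySem.Set.union hits ((pvBuildIndex tgt).getD ngram PySem.Set.empty)) PySem.Set.empty) verseID))
  rw [pvFold_eq_ofList]
  show PySem.Set.ofList ((tgt.filter (fun p => pvScanIdentified ids p.2)).map Prod.fst)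
      = PySem.Set.ofList ((tgt.map Prod.fst).filter (fun verseID =>
          PySem.Set.contains (ids.foldl (fun hits ngram => PySem.Set.union hits ((pvBuildIndex tgt).getD ngram PySem.Set.empty)) PySem.Set.empty) verseID))
  rw [List.filter_map]
  congr 1
  congr 1
  refine (List.filter_congr ?_).symm
  intro p hp
  -- pointwise: B's membership test on p.1 equals A's scan on p.2 (unique key => p's entry)
  rw [pvScan_eq_any, Bool.eq_iff_iff]
  simp only [Function.comp_apply, List.any_eq_true, List.contains_eq_mem, decide_eq_true_eq,
    PySem.Set.contains_eq_listContains, List.contains_eq_mem]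
  rw [pvHits_mem]
  constructor
  · rintro ⟨g, hg, hmem⟩
    obtain ⟨q, hq, h1, h2⟩ := (pvBuildIndex_mem tgt g p.1).1 hmem
    have hqp : q = p := List.inj_on_of_nodup_map hnd hq hp h1
    exact ⟨g, hg, hqp ▸ h2⟩
  · rintro ⟨g, hg, hmem⟩
    exact ⟨g, hg, (pvBuildIndex_mem tgt g p.1).2 ⟨p, hp, rfl, hmem⟩⟩
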